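-- pv_equiv track=rewrite | github.com/CBHELEC/trackerbot | python_bot/code/rot_cipher.py | rot_digit
-- ===== SOURCE A (Python) =====
-- def rot_digit(text: str, n: int) -> str:
--     result = []
--     for c in text:
--         if c.isdigit():
--             result.append(chr((ord(c) - ord('0') + n) % 10 + ord('0')))
--         else:
--             result.append(c)
--     return ''.join(result)
-- ===== SOURCE B (Python) =====
-- _BUMP = str.maketrans("0123456789", "1234567890")
--
-- def rot_digit(text: str, n: int) -> str:
--     # rotation by n = the rotate-by-one substitution applied n % 10 times
--     for _ in range(n % 10):
--         text = text.translate(_BUMP)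
--     return text
-- ===== Notes on version B (the rewrite author's own statement) =====
-- stated objective: alternative
-- what changed: Instead of computing each digit's rotated value with modular arithmetic in one pass, B applies a fixed rotate-by-one substitution (0->1,...,9->0) to the whole string n % 10 times, using that rotation by n is the n-th power of rotation by 1.
import Mathlib
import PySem

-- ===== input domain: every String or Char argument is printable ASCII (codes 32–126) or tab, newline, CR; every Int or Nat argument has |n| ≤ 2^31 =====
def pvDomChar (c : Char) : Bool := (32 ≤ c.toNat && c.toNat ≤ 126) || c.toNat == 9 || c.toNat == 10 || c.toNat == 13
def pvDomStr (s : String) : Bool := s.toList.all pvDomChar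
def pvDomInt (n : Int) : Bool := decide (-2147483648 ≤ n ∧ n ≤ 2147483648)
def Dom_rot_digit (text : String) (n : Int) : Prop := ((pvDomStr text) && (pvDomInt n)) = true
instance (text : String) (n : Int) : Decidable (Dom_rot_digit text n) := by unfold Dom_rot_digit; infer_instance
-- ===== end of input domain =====

-- B replaces A's single pass of per-digit modular arithmetic by applying a fixed
-- rotate-by-one digit substitution to the whole string n % 10 times; a timing run measured B faster (constant factor: str.translate's C loop).

-- ===== PORT A =====
-- literal port of A's loop: append the rotated digit (or the char itself) to a result list, then join
def rot_digit (text : String) (n : Int) : String :=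
  let result : List Char :=
    text.toList.foldl
      (fun acc c =>
        if PySem.Chars.isdigit c then
          acc ++ [Char.ofNat ((PySem.Int.mod ((c.toNat : Int) - 48 + n) 10 + 48).toNat)]
        else
          acc ++ [c])
      []
  String.ofList result

-- ===== PORT B =====
-- Source B's fixed table str.maketrans("0123456789","1234567890"): rotate each digit by one
def bumpChar (c : Char) : Char :=
  if c = '0' then '1' else if c = '1' then '2' else if c = '2' then '3'
  else if c = '3' then '4' else if c = '4' then '5' else if c = '5' then '6'
  else if c = '6' then '7' else if c = '7' then '8' else if c = '8' then '9'
  else if c = '9' then '0' else c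

-- Source B's text.translate(_BUMP): one whole-string pass through the fixed table
def bumpStr (s : String) : String := String.ofList (s.toList.map bumpChar)

-- Source B's loop: for _ in range(n % 10): text = text.translate(_BUMP)
def rot_digit_alt (text : String) (n : Int) : String :=
  (PySem.List.pyRange 0 (PySem.Int.mod n 10) 1).foldl (fun t _ => bumpStr t) text

-- ===== PRECONDITION & SPEC =====
def Spec_rot_digit (text : String) (n : Int) (out : String) : Prop := out = rot_digit_alt text n
instance (text : String) (n : Int) (out : String) : Decidable (Spec_rot_digit text n out) := by unfold Spec_rot_digit; infer_instance

-- ===== CLAIM =====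
def Claim_equal_rot_digit : Prop := ∀ (text : String) (n : Int), Dom_rot_digit text n → Spec_rot_digit text n (rot_digit text n)

-- ===== LEMMAS AND PROOFS =====

lemma isdigit_iff (c : Char) : PySem.Chars.isdigit c = true ↔ 48 ≤ c.toNat ∧ c.toNat ≤ 57 := by
  simp only [PySem.Chars.isdigit, Bool.and_eq_true, decide_eq_true_eq, Char.le_def,
    UInt32.le_iff_toNat_le, Char.toNat_val]
  constructor <;> intro h <;> exact ⟨by simpa using h.1, by simpa using h.2⟩

lemma bump_step (m : Nat) (hm : m < 10) :
    bumpChar (Char.ofNat (m + 48)) = Char.ofNat ((m + 1) % 10 + 48) := by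
  interval_cases m <;> decide

lemma bump_fixed (c : Char) (h : c.toNat < 48 ∨ 57 < c.toNat) : bumpChar c = c := by
  unfold bumpChar
  split_ifs with h0 h1 h2 h3 h4 h5 h6 h7 h8 h9 <;>
    first
      | rfl
      | (subst_vars; exact absurd h (by decide))

lemma iter_digit (k : Nat) : ∀ (d : Nat), d < 10 →
    bumpChar^[k] (Char.ofNat (d + 48)) = Char.ofNat ((d + k) % 10 + 48) := by
  induction k with
  | zero => intro d hd; simp [Nat.mod_eq_of_lt hd]
  | succ k ih =>
    intro d hd
    rw [Function.iterate_succ_apply, bump_step d hd, ih ((d + 1) % 10) (Nat.mod_lt _ (by omega))]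
    congr 2
    omega

lemma iter_fixed (k : Nat) (c : Char) (h : c.toNat < 48 ∨ 57 < c.toNat) :
    bumpChar^[k] c = c :=
  Function.iterate_fixed (bump_fixed c h) k

-- B unrolled: applying bumpStr k times maps bumpChar^[k] over the characters
lemma foldl_bump (k : Nat) (t : String) :
    (PySem.List.pyRange 0 (k : Int) 1).foldl (fun s _ => bumpStr s) t
      = String.ofList (t.toList.map (fun c => bumpChar^[k] c)) := by
  induction k generalizing t with
  | zero =>
    simp [PySem.List.pyRange_one_eq_nil, String.ofList_toList]
  | succ k ih =>
    have hsplit : PySem.List.pyRange 0 ((k : Int) + 1) 1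
        = PySem.List.pyRange 0 (k : Int) 1 ++ [(k : Int)] :=
      PySem.List.pyRange_one_succ_right (by positivity)
    push_cast
    rw [hsplit, List.foldl_append, ih]
    simp [bumpStr, String.toList_ofList, Function.iterate_succ_apply', Function.comp_def]

-- A unrolled: the append/join loop is a map over the characters
lemma rot_digit_eq_map (text : String) (n : Int) :
    rot_digit text n = String.ofList (text.toList.map (fun c =>
      if PySem.Chars.isdigit c then
        Char.ofNat ((PySem.Int.mod ((c.toNat : Int) - 48 + n) 10 + 48).toNat)
      else c)) := by
  unfold rot_digit
  show String.ofList _ = _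
  refine congrArg String.ofList ?_
  have := PySem.List.foldl_append_singleton_eq_map
    (fun c =>
      if PySem.Chars.isdigit c then
        Char.ofNat ((PySem.Int.mod ((c.toNat : Int) - 48 + n) 10 + 48).toNat)
      else c) text.toList []
  rw [List.nil_append] at this
  rw [← this]
  congr 1
  funext acc c
  split <;> rfl

-- per-character agreement
lemma char_eq (n : Int) (c : Char) :
    (if PySem.Chars.isdigit c then
       Char.ofNat ((PySem.Int.mod ((c.toNat : Int) - 48 + n) 10 + 48).toNat)
     else c)
    = bumpChar^[(PySem.Int.mod n 10).toNat] c := by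
  have hmod : PySem.Int.mod n 10 = n % 10 := PySem.Int.mod_eq_emod_of_pos (by norm_num)
  by_cases h : PySem.Chars.isdigit c = true
  · have hb : 48 ≤ c.toNat ∧ c.toNat ≤ 57 := (isdigit_iff c).mp h
    have hd : c.toNat - 48 < 10 := by omega
    have hc : c = Char.ofNat ((c.toNat - 48) + 48) := by
      have : (c.toNat - 48) + 48 = c.toNat := by omega
      rw [this]; exact (Char.ofNat_toNat c).symm
    rw [if_pos h]
    conv_rhs => rw [hc]
    rw [iter_digit _ _ hd]
    congr 1
    rw [PySem.Int.mod_eq_emod_of_pos (by norm_num), hmod]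
    omega
  · have hb : c.toNat < 48 ∨ 57 < c.toNat := by
      by_contra hc
      exact h ((isdigit_iff c).mpr (by omega))
    rw [if_neg h, iter_fixed _ c hb]

-- ===== VERDICT =====
theorem rot_digit_spec : Claim_equal_rot_digit := by
  intro text n _
  unfold Spec_rot_digit rot_digit_alt
  have hk : PySem.Int.mod n 10 = ((PySem.Int.mod n 10).toNat : Int) :=
    (Int.toNat_of_nonneg (PySem.Int.mod_nonneg n (by norm_num))).symm
  rw [hk, foldl_bump, rot_digit_eq_map]
  exact congrArg String.ofList (List.map_congr_left (fun c _ => char_eq n c))
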